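-- pv_equiv track=rewrite | github.com/BillWilsonYnk/Cylinder | cylinder.py | _looks_like_id_param
-- ===== SOURCE A (Python) =====
-- def _looks_like_id_param(param):
--     """Check if a parameter name looks like it might contain an ID"""
--     id_patterns = [
--         'id', 'user', 'account', 'uuid', 'guid', 'num',
--         'item', 'record', 'file', 'doc', 'object', 'uid'
--     ]
--
--     param_lower = param.lower()
--
--     # Direct match for 'id'
--     if param_lower == 'id':
--         return True
--
--     # Contains '_id' or 'id_'
--     if '_id' in param_lower or 'id_' in param_lower:
--         return True
--
--     # Contains any of the patterns
--     for pattern in id_patterns: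
--         if pattern in param_lower:
--             return True
--
--     return False
-- ===== SOURCE B (Python) =====
-- def _looks_like_id_param(param):
--     """Check if a parameter name looks like it might contain an ID"""
--     patterns = ('id', 'user', 'account', 'uuid', 'guid', 'num',
--                 'item', 'record', 'file', 'doc', 'object', 'uid')
--     s = param.lower()
--     # single left-to-right scan: at each position, does some pattern start here?
--     for i in range(len(s)):
--         if any(s.startswith(p, i) for p in patterns):
--             return True
--     return False
-- ===== Notes on version B (the rewrite author's own statement) =====
-- stated objective: alternative
-- what changed: B replaces A's up-to-twelve independent substring scans (plus the redundant =='id' and '_id'/'id_' guards, which are subsumed by the 'id' pattern) with a single left-to-right scan over the lowered string that at each position checks whether any pattern starts there.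
import Mathlib
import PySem

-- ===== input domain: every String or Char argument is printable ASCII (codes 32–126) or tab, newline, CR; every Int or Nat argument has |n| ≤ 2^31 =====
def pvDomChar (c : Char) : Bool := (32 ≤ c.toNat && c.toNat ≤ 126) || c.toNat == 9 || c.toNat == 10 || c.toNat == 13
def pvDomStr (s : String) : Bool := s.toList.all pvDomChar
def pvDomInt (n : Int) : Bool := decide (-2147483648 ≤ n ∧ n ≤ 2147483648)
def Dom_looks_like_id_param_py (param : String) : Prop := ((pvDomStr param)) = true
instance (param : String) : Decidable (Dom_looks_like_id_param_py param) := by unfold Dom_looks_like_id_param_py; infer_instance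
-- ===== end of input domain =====

-- B replaces A's up-to-twelve independent substring scans (plus the redundant =='id' and
-- '_id'/'id_' guards) with a single left-to-right scan that at each position checks whether
-- any pattern starts there (objective: alternative).

-- ===== PORT A =====
def pvIdPatterns : List String :=
  ["id", "user", "account", "uuid", "guid", "num",
   "item", "record", "file", "doc", "object", "uid"]

-- the 'for pattern in id_patterns' loop with early return
def pvALoop : List String → String → Bool
  | [], _ => false
  | p :: rest, s => if PySem.Str.isIn p s then true else pvALoop rest s

def looks_like_id_param_py (param : String) : Bool :=
  let param_lower := PySem.Str.lower param
  if param_lower == "id" then true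
  else if PySem.Str.isIn "_id" param_lower || PySem.Str.isIn "id_" param_lower then true
  else pvALoop pvIdPatterns param_lower

-- ===== PORT B =====
def pvPatternsChars : List (List Char) := pvIdPatterns.map String.toList

-- the 'for i in range(len(s))' scan: at each position check whether any pattern starts there
def pvBScan : List Char → Bool
  | [] => false
  | c :: rest => (pvPatternsChars.any (fun p => p.isPrefixOf (c :: rest))) || pvBScan rest

def looks_like_id_param_py_alt (param : String) : Bool :=
  pvBScan (PySem.Str.lower param).toList

-- ===== PRECONDITION & SPEC =====
def Spec_looks_like_id_param_py (param : String) (out : Bool) : Prop := out = looks_like_id_param_py_alt param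
instance (param : String) (out : Bool) : Decidable (Spec_looks_like_id_param_py param out) := by unfold Spec_looks_like_id_param_py; infer_instance

-- ===== CLAIM (what is proved, stated in full; the proofs are below) =====
def Claim_equal_looks_like_id_param_py : Prop := ∀ (param : String), Dom_looks_like_id_param_py param → Spec_looks_like_id_param_py param (looks_like_id_param_py param)

-- ===== LEMMAS AND PROOFS =====

-- B's scan finds exactly the infix occurrences of some (nonempty) pattern
theorem pvBScan_eq_true_iff (l : List Char) :
    pvBScan l = true ↔ ∃ p ∈ pvPatternsChars, p <:+: l := by
  induction l with
  | nil =>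
    simp only [pvBScan, Bool.false_eq_true, false_iff]
    rintro ⟨p, hp, h⟩
    rw [List.infix_nil] at h
    subst h
    simp [pvPatternsChars, pvIdPatterns] at hp
  | cons c rest ih =>
    simp only [pvBScan, Bool.or_eq_true, List.any_eq_true, ih]
    constructor
    · rintro (⟨p, hp, hpre⟩ | ⟨p, hp, hinf⟩)
      · exact ⟨p, hp, (List.isPrefixOf_iff_prefix.mp hpre).isInfix⟩
      · exact ⟨p, hp, List.IsInfix.trans hinf (List.IsSuffix.isInfix (List.suffix_cons c rest))⟩
    · rintro ⟨p, hp, hinf⟩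
      rcases List.infix_cons_iff.mp hinf with h | h
      · exact Or.inl ⟨p, hp, List.isPrefixOf_iff_prefix.mpr h⟩
      · exact Or.inr ⟨p, hp, h⟩

-- A's loop is the disjunction of the substring tests
theorem pvALoop_eq_true_iff (ps : List String) (s : String) :
    pvALoop ps s = true ↔ ∃ p ∈ ps, p.toList <:+: s.toList := by
  induction ps with
  | nil => simp [pvALoop]
  | cons p rest ih =>
    simp only [pvALoop]
    split_ifs with h
    · simp only [true_iff]
      exact ⟨p, List.mem_cons_self, (PySem.Str.isIn_iff_infix _ _).mp h⟩
    · rw [ih]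
      constructor
      · rintro ⟨q, hq, hinf⟩; exact ⟨q, List.mem_cons_of_mem _ hq, hinf⟩
      · rintro ⟨q, hq, hinf⟩
        rcases List.mem_cons.mp hq with rfl | hq'
        · exact absurd ((PySem.Str.isIn_iff_infix _ _).mpr hinf) h
        · exact ⟨q, hq', hinf⟩

theorem looks_like_id_param_py_spec : Claim_equal_looks_like_id_param_py := by
  intro param _
  unfold Spec_looks_like_id_param_py
  unfold looks_like_id_param_py looks_like_id_param_py_alt
  set s := PySem.Str.lower param with hs
  show (if (s == "id") = true then true
        else if (PySem.Str.isIn "_id" s || PySem.Str.isIn "id_" s) = true then true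
        else pvALoop pvIdPatterns s) = pvBScan s.toList
  have ha : pvALoop pvIdPatterns s = true ↔ ∃ p ∈ pvPatternsChars, p <:+: s.toList := by
    rw [pvALoop_eq_true_iff]
    constructor
    · rintro ⟨p, hp, h⟩; exact ⟨p.toList, List.mem_map_of_mem hp, h⟩
    · rintro ⟨p, hp, h⟩
      rcases List.mem_map.mp hp with ⟨q, hq, rfl⟩; exact ⟨q, hq, h⟩
  have hb := pvBScan_eq_true_iff s.toList
  by_cases hid : (s == "id") = true
  · rw [if_pos hid]
    have hin : ("id" : String).toList <:+: s.toList := by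
      have h' : s = "id" := eq_of_beq hid
      rw [h']
    exact (hb.mpr ⟨"id".toList, by decide, hin⟩).symm
  · rw [if_neg hid]
    by_cases hmid : (PySem.Str.isIn "_id" s || PySem.Str.isIn "id_" s) = true
    · rw [if_pos hmid]
      have hex : ∃ p ∈ pvPatternsChars, p <:+: s.toList := by
        rcases (Bool.or_eq_true _ _).mp hmid with h | h
        · have h1 : ("_id" : String).toList <:+: s.toList := (PySem.Str.isIn_iff_infix _ _).mp h
          exact ⟨"id".toList, by decide,
            List.IsInfix.trans (⟨['_'], [], rfl⟩ : ∃ u v, u ++ ("id" : String).toList ++ v = ("_id" : String).toList) h1⟩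
        · have h1 : ("id_" : String).toList <:+: s.toList := (PySem.Str.isIn_iff_infix _ _).mp h
          exact ⟨"id".toList, by decide,
            List.IsInfix.trans (⟨[], ['_'], rfl⟩ : ∃ u v, u ++ ("id" : String).toList ++ v = ("id_" : String).toList) h1⟩
      exact (hb.mpr hex).symm
    · rw [if_neg hmid]
      by_cases h : ∃ p ∈ pvPatternsChars, p <:+: s.toList
      · rw [ha.mpr h, hb.mpr h]
      · rw [Bool.eq_false_iff.mpr (fun hh => h (ha.mp hh)),
            Bool.eq_false_iff.mpr (fun hh => h (hb.mp hh))]
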